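-- pv_equiv track=rewrite | github.com/bhlevca/researcher-agent | src/researcher/tts.py | _pick_voice_for_lang
-- ===== SOURCE A (Python) =====
-- def _pick_voice_for_lang(lang: str, base_voice: str, voices: list[dict]) -> str:
--     """Pick the best edge-tts voice for a detected language, preserving the gender
--     of the user's selected base voice."""
--     base_gender = "Female"
--     for v in voices:
--         if v["name"] == base_voice:
--             base_gender = v["gender"]
--             break
--
--     lang_prefix = lang.lower()[:2]
--
--     # If the base voice already matches the language, keep it
--     for v in voices:
--         if v["name"] == base_voice and v["locale"].lower().startswith(lang_prefix):
--             return base_voice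
--
--     candidates = [v for v in voices if v["locale"].lower().startswith(lang_prefix)]
--     if not candidates:
--         return base_voice  # no voice for this language; fall back
--
--     # Prefer same gender, then Neural voices (higher quality)
--     gender_match = [v for v in candidates if v["gender"] == base_gender]
--     pool = gender_match or candidates
--     neural = [v for v in pool if "Neural" in v["name"] and "Multilingual" not in v["name"]]
--     return (neural or pool)[0]["name"]
-- ===== SOURCE B (Python) =====
-- def _pick_voice_for_lang(lang: str, base_voice: str, voices: list[dict]) -> str:
--     """Pick the best edge-tts voice for a detected language, preserving the gender
--     of the user's selected base voice.  Single-pass best-candidate scan."""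
--     base_gender = next((v["gender"] for v in voices if v["name"] == base_voice), "Female")
--     prefix = lang.lower()[:2]
--     if any(v["name"] == base_voice and v["locale"].lower().startswith(prefix) for v in voices):
--         return base_voice
--     best = None
--     best_key = (False, False)
--     for v in voices:
--         if not v["locale"].lower().startswith(prefix):
--             continue
--         key = (v["gender"] == base_gender,
--                "Neural" in v["name"] and "Multilingual" not in v["name"])
--         if best is None or key > best_key:
--             best, best_key = v, key
--     return best["name"] if best is not None else base_voice
-- ===== Notes on version B (the rewrite author's own statement) =====
-- stated objective: simpler
-- what changed: Replaced A's three list comprehensions (candidates / gender_match / neural), the or-chained pool selection and the [0] indexing by a single loop over voices that keeps the first candidate with the strictly greatest (gender-match, neural) priority key; the base-gender lookup and the keep-base-voice scan become next()/any() one-liners.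
-- outside the precondition, e.g. on _pick_voice_for_lang('en', 'b', [{'name': 'x', 'locale': 'zz-ZZ'}]): A returns 'b', B returns 'b'
import Mathlib
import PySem

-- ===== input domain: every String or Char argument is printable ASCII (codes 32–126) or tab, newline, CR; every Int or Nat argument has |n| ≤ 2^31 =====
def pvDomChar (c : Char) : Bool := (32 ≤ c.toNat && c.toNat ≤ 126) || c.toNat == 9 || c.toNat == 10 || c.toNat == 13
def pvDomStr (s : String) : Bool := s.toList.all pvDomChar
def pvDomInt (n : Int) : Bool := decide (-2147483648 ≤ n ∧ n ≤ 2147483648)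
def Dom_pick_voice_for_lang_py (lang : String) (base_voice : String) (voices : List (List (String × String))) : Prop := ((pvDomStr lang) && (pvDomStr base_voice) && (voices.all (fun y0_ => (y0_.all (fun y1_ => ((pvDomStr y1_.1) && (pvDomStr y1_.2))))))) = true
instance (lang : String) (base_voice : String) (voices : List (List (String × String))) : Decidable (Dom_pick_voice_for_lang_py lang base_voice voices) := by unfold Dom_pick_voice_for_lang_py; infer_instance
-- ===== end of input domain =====

-- B replaces A's three filtering passes (candidates / gender_match / neural) and the `[0]`
-- indexing by a single scan keeping the first candidate with the greatest (gender, neural)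
-- priority key; objective: simpler one-pass decomposition (same O(n) cost).

-- shared helpers: v[k] lookup (Pre_ guarantees the key is present; Python raises KeyError
-- otherwise), and the three tests both Python versions write inline
def pvGet (v : List (String × String)) (k : String) : String :=
  ((v.find? (fun p => p.1 == k)).map Prod.snd).getD ""

-- v["locale"].lower().startswith(lang_prefix)
def pvCp (lang_prefix : String) (v : List (String × String)) : Bool :=
  PySem.Str.startswith (PySem.Str.lower (pvGet v "locale")) lang_prefix

-- v["gender"] == base_gender
def pvGp (base_gender : String) (v : List (String × String)) : Bool :=
  pvGet v "gender" == base_gender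

-- "Neural" in v["name"] and "Multilingual" not in v["name"]
def pvNp (v : List (String × String)) : Bool :=
  PySem.Str.isIn "Neural" (pvGet v "name") && !(PySem.Str.isIn "Multilingual" (pvGet v "name"))

-- ===== PORT A =====
-- for v in voices: if v["name"] == base_voice: base_gender = v["gender"]; break
def pvA_baseGender (base_voice : String) : List (List (String × String)) → String
  | [] => "Female"
  | v :: rest =>
    if pvGet v "name" == base_voice then pvGet v "gender" else pvA_baseGender base_voice rest

-- for v in voices: if v["name"] == base_voice and v["locale"].lower().startswith(lang_prefix): return base_voice
def pvA_keepBase (base_voice lang_prefix : String) : List (List (String × String)) → Bool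
  | [] => false
  | v :: rest =>
    if pvGet v "name" == base_voice && pvCp lang_prefix v then true
    else pvA_keepBase base_voice lang_prefix rest

def pick_voice_for_lang_py (lang : String) (base_voice : String) (voices : List (List (String × String))) : String :=
  let base_gender := pvA_baseGender base_voice voices
  let lang_prefix := PySem.Str.slice (PySem.Str.lower lang) none (some 2)
  if pvA_keepBase base_voice lang_prefix voices then base_voice
  else
    let candidates := voices.filter (pvCp lang_prefix)
    if candidates.isEmpty then base_voice
    else
      let gender_match := candidates.filter (pvGp base_gender)
      let pool := if gender_match.isEmpty then candidates else gender_match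
      let neural := pool.filter pvNp
      pvGet ((if neural.isEmpty then pool else neural).headD []) "name"

-- ===== PORT B =====
-- Python's tuple comparison key > best_key on a pair of booleans
def pvKeyGT (a b : Bool × Bool) : Bool := (a.1 && !b.1) || (a.1 == b.1 && (a.2 && !b.2))

-- the single loop: skip non-candidates, keep the first candidate with the strictly greatest key
def pvB_scan (base_gender lang_prefix : String) :
    List (List (String × String)) → Option (List (String × String)) → Bool × Bool →
    Option (List (String × String))
  | [], best, _ => best
  | v :: rest, best, best_key =>
    if !(pvCp lang_prefix v) then pvB_scan base_gender lang_prefix rest best best_key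
    else
      let key := (pvGp base_gender v, pvNp v)
      if best.isNone || pvKeyGT key best_key then pvB_scan base_gender lang_prefix rest (some v) key
      else pvB_scan base_gender lang_prefix rest best best_key

def pick_voice_for_lang_py_alt (lang : String) (base_voice : String) (voices : List (List (String × String))) : String :=
  let base_gender :=
    match voices.find? (fun v => pvGet v "name" == base_voice) with
    | some v => pvGet v "gender"
    | none => "Female"
  let lang_prefix := PySem.Str.slice (PySem.Str.lower lang) none (some 2)
  if voices.any (fun v => pvGet v "name" == base_voice && pvCp lang_prefix v) then base_voice
  else
    match pvB_scan base_gender lang_prefix voices none (false, false) with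
    | some best => pvGet best "name"
    | none => base_voice

-- ===== PRECONDITION & SPEC =====
-- Pre_ excludes voice dicts missing one of the keys "name"/"gender"/"locale": Python A raises
-- KeyError on essentially all of them; it is slightly narrower than that reason (a voice whose
-- locale does not match may lack "gender" and A still returns — both programs agree there).
def Pre_pick_voice_for_lang_py (lang : String) (base_voice : String) (voices : List (List (String × String))) : Prop :=
  (voices.all (fun v =>
    (v.find? (fun p => p.1 == "name")).isSome &&
    (v.find? (fun p => p.1 == "gender")).isSome &&
    (v.find? (fun p => p.1 == "locale")).isSome)) = true
instance (lang : String) (base_voice : String) (voices : List (List (String × String))) : Decidable (Pre_pick_voice_for_lang_py lang base_voice voices) := by unfold Pre_pick_voice_for_lang_py; infer_instance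

def pvWitness_pick_voice_for_lang_py : String × String × (List (List (String × String))) :=
  ("en", "X", [[("name", "A"), ("gender", "Female"), ("locale", "en-US")]])

def Spec_pick_voice_for_lang_py (lang : String) (base_voice : String) (voices : List (List (String × String))) (out : String) : Prop := out = pick_voice_for_lang_py_alt lang base_voice voices
instance (lang : String) (base_voice : String) (voices : List (List (String × String))) (out : String) : Decidable (Spec_pick_voice_for_lang_py lang base_voice voices out) := by unfold Spec_pick_voice_for_lang_py; infer_instance

-- ===== CLAIM (what is proved, stated in full; the proofs are below) =====
def Claim_equal_pick_voice_for_lang_py : Prop := ∀ (lang : String) (base_voice : String) (voices : List (List (String × String))), Dom_pick_voice_for_lang_py lang base_voice voices → Pre_pick_voice_for_lang_py lang base_voice voices → Spec_pick_voice_for_lang_py lang base_voice voices (pick_voice_for_lang_py lang base_voice voices)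

-- ===== LEMMAS AND PROOFS =====

-- numeric priority of a candidate: gender match weighs 2, neural weighs 1
def pvKv (bg : String) (v : List (String × String)) : Nat :=
  (if pvGp bg v then 2 else 0) + (if pvNp v then 1 else 0)

-- the first element of b :: l attaining the maximal priority
def pvFmax (bg : String) : List (List (String × String)) → List (String × String) → List (String × String)
  | [], b => b
  | v :: rest, b => if pvKv bg v > pvKv bg b then pvFmax bg rest v else pvFmax bg rest b

def pvKmax (bg : String) (b : List (String × String)) (rest : List (List (String × String))) : Nat :=
  rest.foldl (fun m v => max m (pvKv bg v)) (pvKv bg b)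

theorem pvKeyGT_eq (bg : String) (v b : List (String × String)) :
    pvKeyGT (pvGp bg v, pvNp v) (pvGp bg b, pvNp b) = decide (pvKv bg v > pvKv bg b) := by
  unfold pvKeyGT pvKv
  cases pvGp bg v <;> cases pvNp v <;> cases pvGp bg b <;> cases pvNp b <;> rfl

theorem pvKv_le_three (bg : String) (v : List (String × String)) : pvKv bg v ≤ 3 := by
  unfold pvKv; split <;> split <;> omega

theorem pvKv_eq_three_iff (bg : String) (v : List (String × String)) :
    pvKv bg v = 3 ↔ (pvGp bg v = true ∧ pvNp v = true) := by
  unfold pvKv; cases h1 : pvGp bg v <;> cases h2 : pvNp v <;> simp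

theorem scan_some (bg p : String) (l : List (List (String × String))) :
    ∀ b, pvB_scan bg p l (some b) (pvGp bg b, pvNp b) = some (pvFmax bg (l.filter (pvCp p)) b) := by
  induction l with
  | nil => intro b; rfl
  | cons v rest ih =>
    intro b
    by_cases hc : pvCp p v = true
    · by_cases hk : pvKv bg v > pvKv bg b
      · simp [pvB_scan, hc, pvKeyGT_eq, hk, List.filter_cons, pvFmax, ih]
      · simp [pvB_scan, hc, pvKeyGT_eq, hk, List.filter_cons, pvFmax, ih]
    · simp [pvB_scan, hc, List.filter_cons, ih]

theorem scan_none (bg p : String) (l : List (List (String × String))) :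
    pvB_scan bg p l none (false, false) =
      (match l.filter (pvCp p) with
       | [] => none
       | b :: rest => some (pvFmax bg rest b)) := by
  induction l with
  | nil => rfl
  | cons v rest ih =>
    by_cases hc : pvCp p v = true
    · simp [pvB_scan, hc, List.filter_cons, scan_some bg p rest v]
    · simp [pvB_scan, hc, List.filter_cons, ih]

theorem find?_ext {p q : List (String × String) → Bool} :
    ∀ (l : List (List (String × String))), (∀ a ∈ l, p a = q a) → l.find? p = l.find? q := by
  intro l
  induction l with
  | nil => intro _; rfl
  | cons a t ih =>
    intro h
    simp only [List.find?]
    rw [h a (by simp)]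
    cases q a
    · exact ih (fun x hx => h x (by simp [hx]))
    · rfl

theorem le_pvKmax (bg : String) (b : List (String × String)) (rest : List (List (String × String))) :
    pvKv bg b ≤ pvKmax bg b rest ∧ ∀ v ∈ rest, pvKv bg v ≤ pvKmax bg b rest := by
  unfold pvKmax
  rw [← List.foldl_map]
  obtain ⟨h1, h2⟩ := PySem.List.le_foldl_max (rest.map (pvKv bg)) (pvKv bg b)
  exact ⟨h1, fun v hv => h2 _ (List.mem_map_of_mem hv)⟩

theorem pvKmax_mem (bg : String) (b : List (String × String)) (rest : List (List (String × String))) :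
    pvKmax bg b rest = pvKv bg b ∨ ∃ v ∈ rest, pvKmax bg b rest = pvKv bg v := by
  unfold pvKmax
  rw [← List.foldl_map]
  rcases PySem.List.foldl_max_mem (rest.map (pvKv bg)) (pvKv bg b) with h | h
  · exact Or.inl h
  · obtain ⟨v, hv, he⟩ := List.mem_map.mp h
    exact Or.inr ⟨v, hv, he.symm⟩

theorem pvKmax_cons (bg : String) (b v : List (String × String)) (rest : List (List (String × String))) :
    pvKmax bg b (v :: rest) = pvKmax bg (if pvKv bg v > pvKv bg b then v else b) rest := by
  unfold pvKmax
  simp only [List.foldl_cons]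
  congr 1
  split <;> omega

theorem find?_kmax (bg : String) :
    ∀ (rest : List (List (String × String))) (b : List (String × String)),
      (b :: rest).find? (fun v => pvKv bg v == pvKmax bg b rest) = some (pvFmax bg rest b) := by
  intro rest
  induction rest with
  | nil => intro b; simp [pvKmax, pvFmax, List.find?]
  | cons v rest ih =>
    intro b
    rw [pvKmax_cons]
    by_cases hk : pvKv bg v > pvKv bg b
    · simp only [if_pos hk]
      have hM : pvKv bg v ≤ pvKmax bg v rest := (le_pvKmax bg v rest).1
      rw [List.find?_cons_of_neg (by simp; omega)]
      simp only [pvFmax, if_pos hk]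
      exact ih v
    · simp only [if_neg hk]
      have hle : pvKv bg v ≤ pvKv bg b := by omega
      have hbM : pvKv bg b ≤ pvKmax bg b rest := (le_pvKmax bg b rest).1
      by_cases hb : pvKv bg b = pvKmax bg b rest
      · rw [List.find?_cons_of_pos (by simp [hb])]
        have h2 := ih b
        rw [List.find?_cons_of_pos (by simp [hb])] at h2
        have hf : pvFmax bg rest b = b := by injection h2 with h; exact h.symm
        simp [pvFmax, if_neg hk, hf]
      · have hblt : pvKv bg b < pvKmax bg b rest := by omega
        have hvlt : pvKv bg v < pvKmax bg b rest := by omega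
        rw [List.find?_cons_of_neg (by simp; omega), List.find?_cons_of_neg (by simp; omega)]
        have h2 := ih b
        rw [List.find?_cons_of_neg (by simp; omega)] at h2
        rw [h2]
        simp [pvFmax, if_neg hk]

theorem filter_ne_nil_iff {p : List (String × String) → Bool} {l : List (List (String × String))} :
    l.filter p ≠ [] ↔ ∃ a ∈ l, p a = true := by
  rw [ne_eq, List.filter_eq_nil_iff]
  simp

-- A's three-pass selection on a nonempty candidate list picks exactly the first candidate of
-- maximal priority, i.e. pvFmax.
theorem aside (bg : String) (b : List (String × String)) (rest : List (List (String × String))) :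
    (let gm := (b :: rest).filter (pvGp bg)
     let pool := if gm.isEmpty then b :: rest else gm
     let neural := pool.filter pvNp
     (if neural.isEmpty then pool else neural).headD []) = pvFmax bg rest b := by
  have hub : ∀ v ∈ b :: rest, pvKv bg v ≤ pvKmax bg b rest := by
    intro v hv
    rcases List.mem_cons.mp hv with h | h
    · rw [h]; exact (le_pvKmax bg b rest).1
    · exact (le_pvKmax bg b rest).2 v h
  have key : ∀ P : List (String × String) → Bool,
      (∀ v ∈ b :: rest, P v = (pvKv bg v == pvKmax bg b rest)) →
      (b :: rest).find? P = some (pvFmax bg rest b) := by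
    intro P hP
    rw [find?_ext _ hP]
    exact find?_kmax bg rest b
  have hle3 : pvKmax bg b rest ≤ 3 := by
    rcases pvKmax_mem bg b rest with h | ⟨w, _, h⟩ <;> rw [h] <;> exact pvKv_le_three bg _
  dsimp only
  by_cases hgm : (b :: rest).filter (pvGp bg) = []
  · -- no gender match: pool = candidates
    have hng : ∀ v ∈ b :: rest, pvGp bg v = false := by
      intro v hv
      by_contra hc
      exact (List.filter_eq_nil_iff.mp hgm) v hv (by simpa using hc)
    rw [hgm]
    simp only [List.isEmpty_nil, if_true]
    by_cases hne : (b :: rest).filter pvNp = []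
    · -- nothing neural either: every key is 0, result is candidates[0] = b
      have h0 : ∀ v ∈ b :: rest, pvKv bg v = 0 := by
        intro v hv
        have h1 := hng v hv
        have h2 : pvNp v = false := by
          by_contra hc
          exact (List.filter_eq_nil_iff.mp hne) v hv (by simpa using hc)
        simp [pvKv, h1, h2]
      have hfb := key (fun _ => true) (by
        intro v hv
        have hM : pvKmax bg b rest = 0 := by
          rcases pvKmax_mem bg b rest with h | ⟨w, hw, h⟩
          · rw [h]; exact h0 b (by simp)
          · rw [h]; exact h0 w (by simp [hw])
        simp [hM, h0 v hv])
      rw [List.find?_cons_of_pos rfl] at hfb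
      injection hfb with h
      rw [hne]
      simp only [List.isEmpty_nil, if_true, List.headD_cons]
      exact h
    · -- neural candidates exist: M = 1, result = first neural
      obtain ⟨x, hx, hnx⟩ := filter_ne_nil_iff.mp hne
      have hM : pvKmax bg b rest = 1 := by
        have h1 : pvKv bg x = 1 := by simp [pvKv, hng x hx, hnx]
        have h2 := hub x hx
        have h3 : ∀ v ∈ b :: rest, pvKv bg v ≤ 1 := by
          intro v hv; simp [pvKv, hng v hv]; split <;> omega
        rcases pvKmax_mem bg b rest with h | ⟨w, hw, h⟩
        · have := h3 b (by simp); omega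
        · have := h3 w (by simp [hw]); rw [h]; omega
      have hf := key pvNp (by
        intro v hv
        rw [hM]
        cases hn : pvNp v <;> simp [pvKv, hng v hv, hn])
      rw [if_neg (by rw [List.isEmpty_iff]; exact hne)]
      rw [List.headD_eq_head?_getD, List.head?_filter, hf]
      rfl
  · -- gender matches exist: pool = gender_match
    obtain ⟨g, hg, hgg⟩ := filter_ne_nil_iff.mp hgm
    have hpool : (if ((b :: rest).filter (pvGp bg)).isEmpty = true then b :: rest
        else (b :: rest).filter (pvGp bg)) = (b :: rest).filter (pvGp bg) :=
      if_neg (by rw [List.isEmpty_iff]; exact hgm)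
    rw [hpool]
    have hff : ((b :: rest).filter (pvGp bg)).filter pvNp
        = (b :: rest).filter (fun v => pvNp v && pvGp bg v) := by
      simp [List.filter_filter]
    by_cases hne : ((b :: rest).filter (pvGp bg)).filter pvNp = []
    · -- no neural gender match: M = 2, result = first gender match
      have hnogn : ∀ v ∈ b :: rest, pvGp bg v = true → pvNp v = false := by
        intro v hv hgv
        by_contra hc
        exact (List.filter_eq_nil_iff.mp hne) v (List.mem_filter.mpr ⟨hv, hgv⟩) (by simpa using hc)
      have hM : pvKmax bg b rest = 2 := by
        have h1 : pvKv bg g = 2 := by simp [pvKv, hgg, hnogn g hg hgg]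
        have h2 := hub g hg
        have h3 : pvKmax bg b rest ≠ 3 := by
          intro h
          rcases pvKmax_mem bg b rest with hh | ⟨w, hw, hh⟩
          · rw [hh] at h
            obtain ⟨ha, hb2⟩ := (pvKv_eq_three_iff bg b).mp h
            exact absurd (hnogn b (by simp) ha) (by simp [hb2])
          · rw [hh] at h
            obtain ⟨ha, hb2⟩ := (pvKv_eq_three_iff bg w).mp h
            exact absurd (hnogn w (by simp [hw]) ha) (by simp [hb2])
        omega
      have hf := key (pvGp bg) (by
        intro v hv
        rw [hM]
        cases hgv : pvGp bg v
        · cases hn : pvNp v <;> simp [pvKv, hgv, hn]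
        · simp [pvKv, hgv, hnogn v hv hgv])
      rw [if_pos (by rw [List.isEmpty_iff]; exact hne)]
      rw [List.headD_eq_head?_getD, List.head?_filter, hf]
      rfl
    · -- a neural gender match exists: M = 3, result = first neural gender match
      obtain ⟨x, hx, hnx⟩ := filter_ne_nil_iff.mp hne
      obtain ⟨hxm, hxg⟩ := List.mem_filter.mp hx
      have hM : pvKmax bg b rest = 3 := by
        have h1 : pvKv bg x = 3 := (pvKv_eq_three_iff bg x).mpr ⟨hxg, hnx⟩
        have h2 := hub x hxm
        omega
      have hf := key (fun v => pvNp v && pvGp bg v) (by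
        intro v hv
        rw [hM]
        cases hgv : pvGp bg v <;> cases hn : pvNp v <;> simp [pvKv, hgv, hn])
      rw [if_neg (by rw [List.isEmpty_iff]; exact hne)]
      rw [List.headD_eq_head?_getD, hff, List.head?_filter, hf]
      rfl

theorem baseGender_eq (bv : String) (voices : List (List (String × String))) :
    pvA_baseGender bv voices =
      (match voices.find? (fun v => pvGet v "name" == bv) with
       | some v => pvGet v "gender"
       | none => "Female") := by
  induction voices with
  | nil => rfl
  | cons v rest ih =>
    simp only [pvA_baseGender, List.find?]
    cases h : (pvGet v "name" == bv) <;> simp [ih]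

theorem keepBase_eq (bv p : String) (voices : List (List (String × String))) :
    pvA_keepBase bv p voices =
      voices.any (fun v => pvGet v "name" == bv && pvCp p v) := by
  induction voices with
  | nil => rfl
  | cons v rest ih =>
    simp only [pvA_keepBase, List.any_cons]
    cases h : (pvGet v "name" == bv && pvCp p v) <;> simp [ih]

theorem ports_eq (lang base_voice : String) (voices : List (List (String × String))) :
    pick_voice_for_lang_py lang base_voice voices = pick_voice_for_lang_py_alt lang base_voice voices := by
  unfold pick_voice_for_lang_py pick_voice_for_lang_py_alt
  dsimp only
  rw [baseGender_eq, keepBase_eq]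
  set bg := (match voices.find? (fun v => pvGet v "name" == base_voice) with
    | some v => pvGet v "gender"
    | none => "Female") with hbg
  set p := PySem.Str.slice (PySem.Str.lower lang) none (some 2) with hp
  by_cases hkeep : voices.any (fun v => pvGet v "name" == base_voice && pvCp p v) = true
  · simp [hkeep]
  · simp only [Bool.not_eq_true] at hkeep
    rw [hkeep]
    simp only [Bool.false_eq_true, if_false]
    rw [scan_none]
    rcases hcs : voices.filter (pvCp p) with _ | ⟨b, rest⟩
    · simp
    · simp only [List.isEmpty_cons, Bool.false_eq_true, if_false]
      exact congrArg (fun l => pvGet l "name") (aside bg b rest)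

-- ===== VERDICT (by name: the statement is the Claim_ definition above) =====
theorem pick_voice_for_lang_py_spec : Claim_equal_pick_voice_for_lang_py := by
  intro lang base_voice voices _ _
  unfold Spec_pick_voice_for_lang_py
  exact ports_eq lang base_voice voices
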